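-- pv_equiv track=rewrite | github.com/Yuan-UQ/hybrid-AR-board-game | xiangqi_arena_demo/rules/common_rules.py | get_straight_line_path
-- ===== SOURCE A (Python) =====
-- def get_straight_line_path(x1: int, y1: int, x2: int, y2: int) -> list[tuple[int, int]]:
--     """
--     Return intermediate cells strictly between start and end if they are on
--     the same row or same column.
--     Excludes both endpoints.
--     """
--     path = []
--
--     if x1 == x2:
--         step = 1 if y2 > y1 else -1
--         for y in range(y1 + step, y2, step):
--             path.append((x1, y))
--     elif y1 == y2:
--         step = 1 if x2 > x1 else -1
--         for x in range(x1 + step, x2, step):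
--             path.append((x, y1))
--
--     return path
-- ===== SOURCE B (Python) =====
-- def get_straight_line_path(x1: int, y1: int, x2: int, y2: int) -> list[tuple[int, int]]:
--     """Intermediate cells strictly between the endpoints on a shared row or column.
--
--     Walks BACKWARD from the end point toward the start, one cell per
--     iteration, collecting cells in reverse order, then reverses once.
--     """
--     if x1 != x2 and y1 != y2:
--         return []
--     rev = []
--     x, y = x2, y2
--     while True:
--         x += (x < x1) - (x > x1)
--         y += (y < y1) - (y > y1)
--         if x == x1 and y == y1:
--             break
--         rev.append((x, y))
--     rev.reverse()
--     return rev
-- ===== Notes on version B (the rewrite author's own statement) =====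
-- stated objective: alternative
-- what changed: Instead of A's forward axis-specific range loops from the start point, B walks backward from the END point toward the start one cell per step (no range object), accumulating the intermediate cells in reverse and reversing the list once at the end.
import Mathlib
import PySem

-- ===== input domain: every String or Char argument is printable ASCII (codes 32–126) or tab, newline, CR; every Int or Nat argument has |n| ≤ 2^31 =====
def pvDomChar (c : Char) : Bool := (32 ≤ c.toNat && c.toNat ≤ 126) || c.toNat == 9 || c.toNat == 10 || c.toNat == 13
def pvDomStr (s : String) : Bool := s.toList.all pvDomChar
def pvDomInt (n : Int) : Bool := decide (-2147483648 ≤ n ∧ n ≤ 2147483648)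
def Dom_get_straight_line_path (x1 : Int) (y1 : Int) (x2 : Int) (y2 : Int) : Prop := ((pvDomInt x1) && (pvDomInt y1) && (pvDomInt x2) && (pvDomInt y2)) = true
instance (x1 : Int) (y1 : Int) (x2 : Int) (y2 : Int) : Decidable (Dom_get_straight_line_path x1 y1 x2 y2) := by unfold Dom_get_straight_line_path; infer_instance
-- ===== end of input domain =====

-- B replaces A's forward axis-specific range loops by a backward walk from the end
-- point toward the start, collecting cells in reverse and reversing once (objective: alternative).

-- ===== PORT A =====
def get_straight_line_path (x1 : Int) (y1 : Int) (x2 : Int) (y2 : Int) : List (Int × Int) :=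
  let path : List (Int × Int) := []
  if x1 = x2 then
    let step : Int := if y2 > y1 then 1 else -1
    (PySem.List.pyRange (y1 + step) y2 step).foldl (fun p y => p ++ [(x1, y)]) path
  else if y1 = y2 then
    let step : Int := if x2 > x1 then 1 else -1
    (PySem.List.pyRange (x1 + step) x2 step).foldl (fun p x => p ++ [(x, y1)]) path
  else path

-- ===== PORT B =====
-- one step of the backward walk: move coordinate a one unit toward target t
def gslpStep (t : Int) (a : Int) : Int :=
  a + ((if a < t then (1:Int) else 0) - (if t < a then (1:Int) else 0))

-- the while-True loop of Source B: from (x, y) step toward (x1, y1), appending each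
-- intermediate cell; stops when the step reaches the start point.  The fuel
-- argument is only a totality device: it is the exact number of steps the walk
-- takes (the taxicab distance to the start), so the 0-case is never the
-- deciding exit on the inputs the alt port supplies.
def gslpWalk : Nat → Int → Int → Int → Int → List (Int × Int) → List (Int × Int)
  | 0, _, _, _, _, rev => rev
  | fuel + 1, x1, y1, x, y, rev =>
      if gslpStep x1 x = x1 ∧ gslpStep y1 y = y1 then rev
      else gslpWalk fuel x1 y1 (gslpStep x1 x) (gslpStep y1 y)
        (rev ++ [(gslpStep x1 x, gslpStep y1 y)])

def get_straight_line_path_alt (x1 : Int) (y1 : Int) (x2 : Int) (y2 : Int) : List (Int × Int) :=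
  if x1 ≠ x2 ∧ y1 ≠ y2 then []
  else (gslpWalk ((x2 - x1).natAbs + (y2 - y1).natAbs) x1 y1 x2 y2 []).reverse

-- ===== PRECONDITION & SPEC =====
def Spec_get_straight_line_path (x1 : Int) (y1 : Int) (x2 : Int) (y2 : Int) (out : List (Int × Int)) : Prop := out = get_straight_line_path_alt x1 y1 x2 y2
instance (x1 : Int) (y1 : Int) (x2 : Int) (y2 : Int) (out : List (Int × Int)) : Decidable (Spec_get_straight_line_path x1 y1 x2 y2 out) := by unfold Spec_get_straight_line_path; infer_instance

-- ===== CLAIM (what is proved, stated in full; the proofs are below) =====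
def Claim_equal_get_straight_line_path : Prop := ∀ (x1 : Int) (y1 : Int) (x2 : Int) (y2 : Int), Dom_get_straight_line_path x1 y1 x2 y2 → Spec_get_straight_line_path x1 y1 x2 y2 (get_straight_line_path x1 y1 x2 y2)

-- ===== LEMMAS AND PROOFS =====

-- A's append-accumulating loop is a map.
theorem foldl_append_singleton {α β : Type} (f : α → β) :
    ∀ (l : List α) (init : List β), l.foldl (fun p y => p ++ [f y]) init = init ++ l.map f := by
  intro l
  induction l with
  | nil => simp
  | cons a t ih => intro init; simp [List.foldl, ih]

-- reversing a map over range re-indexes it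
theorem map_range_reverse {α : Type} (f : Nat → α) (n : Nat) :
    ((List.range n).map f).reverse = (List.range n).map (fun i => f (n - 1 - i)) := by
  apply List.ext_getElem
  · simp
  · intro i h1 h2
    simp only [List.length_map, List.length_reverse, List.length_range] at h1 h2
    rw [List.getElem_reverse]
    simp only [List.getElem_map, List.getElem_range, List.length_map, List.length_range]

theorem gslpStep_self (t : Int) : gslpStep t t = t := by simp [gslpStep]

theorem gslpStep_down (t : Int) (d : Nat) : gslpStep t (t + ((d : Int) + 1)) = t + d := by
  simp only [gslpStep]
  split_ifs <;> omega

theorem gslpStep_up (t : Int) (d : Nat) : gslpStep t (t - ((d : Int) + 1)) = t - d := by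
  simp only [gslpStep]
  split_ifs <;> omega

-- column, end above start: walk from (x1, y1 + d) appends (x1, y1+d-1), …, (x1, y1+1)
theorem walk_col_up (x1 y1 : Int) : ∀ (d : Nat) (rev : List (Int × Int)),
    gslpWalk d x1 y1 x1 (y1 + (d : Int)) rev
      = rev ++ (List.range (d - 1)).map (fun (k : Nat) => ((x1 : Int), y1 + (d : Int) - 1 - (k : Int))) := by
  intro d
  induction d with
  | zero => intro rev; simp [gslpWalk]
  | succ d ih =>
    intro rev
    simp only [gslpWalk, gslpStep_self]
    rw [show ((↑(d + 1) : Int)) = (d : Int) + 1 by push_cast; ring, gslpStep_down]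
    cases d with
    | zero => simp
    | succ d =>
      rw [if_neg (by push_cast; intro h; omega), ih, List.append_assoc]
      congr 1
      rw [(by omega : d + 1 + 1 - 1 = d + 1), (by omega : d + 1 - 1 = d),
          List.range_succ_eq_map]
      simp only [List.map_cons, List.map_map, List.singleton_append]
      refine List.cons_eq_cons.mpr ⟨?_, ?_⟩
      · refine Prod.ext rfl ?_
        push_cast; ring
      · apply List.map_congr_left
        intro k hk
        refine Prod.ext rfl ?_
        simp only [Function.comp]
        push_cast; ring

-- column, end below start: walk from (x1, y1 - d) appends (x1, y1-d+1), …, (x1, y1-1)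
theorem walk_col_down (x1 y1 : Int) : ∀ (d : Nat) (rev : List (Int × Int)),
    gslpWalk d x1 y1 x1 (y1 - (d : Int)) rev
      = rev ++ (List.range (d - 1)).map (fun (k : Nat) => ((x1 : Int), y1 - (d : Int) + 1 + (k : Int))) := by
  intro d
  induction d with
  | zero => intro rev; simp [gslpWalk]
  | succ d ih =>
    intro rev
    simp only [gslpWalk, gslpStep_self]
    rw [show ((↑(d + 1) : Int)) = (d : Int) + 1 by push_cast; ring, gslpStep_up]
    cases d with
    | zero => simp
    | succ d =>
      rw [if_neg (by push_cast; intro h; omega), ih, List.append_assoc]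
      congr 1
      rw [(by omega : d + 1 + 1 - 1 = d + 1), (by omega : d + 1 - 1 = d),
          List.range_succ_eq_map]
      simp only [List.map_cons, List.map_map, List.singleton_append]
      refine List.cons_eq_cons.mpr ⟨?_, ?_⟩
      · refine Prod.ext rfl ?_
        push_cast; ring
      · apply List.map_congr_left
        intro k hk
        refine Prod.ext rfl ?_
        simp only [Function.comp]
        push_cast; ring

-- row, end right of start
theorem walk_row_up (x1 y1 : Int) : ∀ (d : Nat) (rev : List (Int × Int)),
    gslpWalk d x1 y1 (x1 + (d : Int)) y1 rev
      = rev ++ (List.range (d - 1)).map (fun (k : Nat) => (x1 + (d : Int) - 1 - (k : Int), (y1 : Int))) := by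
  intro d
  induction d with
  | zero => intro rev; simp [gslpWalk]
  | succ d ih =>
    intro rev
    simp only [gslpWalk, gslpStep_self]
    rw [show ((↑(d + 1) : Int)) = (d : Int) + 1 by push_cast; ring, gslpStep_down]
    cases d with
    | zero => simp
    | succ d =>
      rw [if_neg (by push_cast; intro h; omega), ih, List.append_assoc]
      congr 1
      rw [(by omega : d + 1 + 1 - 1 = d + 1), (by omega : d + 1 - 1 = d),
          List.range_succ_eq_map]
      simp only [List.map_cons, List.map_map, List.singleton_append]
      refine List.cons_eq_cons.mpr ⟨?_, ?_⟩
      · refine Prod.ext ?_ rfl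
        push_cast; ring
      · apply List.map_congr_left
        intro k hk
        refine Prod.ext ?_ rfl
        simp only [Function.comp]
        push_cast; ring

-- row, end left of start
theorem walk_row_down (x1 y1 : Int) : ∀ (d : Nat) (rev : List (Int × Int)),
    gslpWalk d x1 y1 (x1 - (d : Int)) y1 rev
      = rev ++ (List.range (d - 1)).map (fun (k : Nat) => (x1 - (d : Int) + 1 + (k : Int), (y1 : Int))) := by
  intro d
  induction d with
  | zero => intro rev; simp [gslpWalk]
  | succ d ih =>
    intro rev
    simp only [gslpWalk, gslpStep_self]
    rw [show ((↑(d + 1) : Int)) = (d : Int) + 1 by push_cast; ring, gslpStep_up]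
    cases d with
    | zero => simp
    | succ d =>
      rw [if_neg (by push_cast; intro h; omega), ih, List.append_assoc]
      congr 1
      rw [(by omega : d + 1 + 1 - 1 = d + 1), (by omega : d + 1 - 1 = d),
          List.range_succ_eq_map]
      simp only [List.map_cons, List.map_map, List.singleton_append]
      refine List.cons_eq_cons.mpr ⟨?_, ?_⟩
      · refine Prod.ext ?_ rfl
        push_cast; ring
      · apply List.map_congr_left
        intro k hk
        refine Prod.ext ?_ rfl
        simp only [Function.comp]
        push_cast; ring

theorem gslp_eq (x1 y1 x2 y2 : Int) :
    get_straight_line_path x1 y1 x2 y2 = get_straight_line_path_alt x1 y1 x2 y2 := by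
  unfold get_straight_line_path get_straight_line_path_alt
  by_cases hx : x1 = x2
  · subst hx
    rw [if_pos rfl]
    by_cases hy : y1 < y2
    · obtain ⟨d, hy2⟩ : ∃ d : Nat, y2 = y1 + (d : Int) := ⟨(y2 - y1).toNat, by omega⟩
      subst hy2
      have h1 : y1 < y1 + (d : Int) := hy
      have h2 : ¬ (y1 + (d : Int) < y1) := by omega
      simp only [gt_iff_lt, h1, if_true, if_false,
        foldl_append_singleton, List.nil_append, ne_eq, not_true_eq_false, false_and]
      rw [(by omega : (x1 - x1).natAbs + (y1 + (d : Int) - y1).natAbs = d)]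
      rw [PySem.List.pyRange_one, List.map_map, walk_col_up, List.nil_append,
          map_range_reverse, (by omega : (y1 + (d : Int) - (y1 + 1)).toNat = d - 1)]
      apply List.map_congr_left
      intro i hi
      have : i < d - 1 := List.mem_range.mp hi
      simp only [Function.comp]
      refine Prod.ext rfl ?_
      omega
    · obtain ⟨d, hy2⟩ : ∃ d : Nat, y2 = y1 - (d : Int) := ⟨(y1 - y2).toNat, by omega⟩
      subst hy2
      have h1 : ¬ (y1 < y1 - (d : Int)) := hy
      simp only [gt_iff_lt, h1, if_false,
        foldl_append_singleton, List.nil_append, ne_eq, not_true_eq_false, false_and]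
      rw [(by omega : (x1 - x1).natAbs + (y1 - (d : Int) - y1).natAbs = d)]
      rw [PySem.List.pyRange_neg_one, List.map_map, walk_col_down, List.nil_append,
          map_range_reverse, (by omega : (y1 + -1 - (y1 - (d : Int))).toNat = d - 1)]
      apply List.map_congr_left
      intro i hi
      have : i < d - 1 := List.mem_range.mp hi
      simp only [Function.comp]
      refine Prod.ext rfl ?_
      omega
  · rw [if_neg hx]
    by_cases hy : y1 = y2
    · subst hy
      rw [if_pos rfl]
      by_cases hgt : x1 < x2
      · obtain ⟨d, hx2⟩ : ∃ d : Nat, x2 = x1 + (d : Int) := ⟨(x2 - x1).toNat, by omega⟩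
        subst hx2
        have h1 : x1 < x1 + (d : Int) := hgt
        have h2 : ¬ (x1 + (d : Int) < x1) := by omega
        simp only [gt_iff_lt, h1, if_true, if_false,
          foldl_append_singleton, List.nil_append, ne_eq, not_true_eq_false, and_false]
        rw [(by omega : (x1 + (d : Int) - x1).natAbs + (y1 - y1).natAbs = d)]
        rw [PySem.List.pyRange_one, List.map_map, walk_row_up, List.nil_append,
            map_range_reverse, (by omega : (x1 + (d : Int) - (x1 + 1)).toNat = d - 1)]
        apply List.map_congr_left
        intro i hi
        have : i < d - 1 := List.mem_range.mp hi
        simp only [Function.comp]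
        refine Prod.ext ?_ rfl
        omega
      · obtain ⟨d, hx2⟩ : ∃ d : Nat, x2 = x1 - (d : Int) := ⟨(x1 - x2).toNat, by omega⟩
        subst hx2
        have h1 : ¬ (x1 < x1 - (d : Int)) := hgt
        simp only [gt_iff_lt, h1, if_false,
          foldl_append_singleton, List.nil_append, ne_eq, not_true_eq_false, and_false]
        rw [(by omega : (x1 - (d : Int) - x1).natAbs + (y1 - y1).natAbs = d)]
        rw [PySem.List.pyRange_neg_one, List.map_map, walk_row_down, List.nil_append,
            map_range_reverse, (by omega : (x1 + -1 - (x1 - (d : Int))).toNat = d - 1)]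
        apply List.map_congr_left
        intro i hi
        have : i < d - 1 := List.mem_range.mp hi
        simp only [Function.comp]
        refine Prod.ext ?_ rfl
        omega
    · rw [if_neg hy, if_pos ⟨hx, hy⟩]

-- ===== VERDICT (by name: the statement is the Claim_ definition above) =====
theorem get_straight_line_path_spec : Claim_equal_get_straight_line_path := by
  intro x1 y1 x2 y2 _
  exact gslp_eq x1 y1 x2 y2
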